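-- pv_equiv track=rewrite | github.com/JulietaCaro/Programacion-I | Simulacro 2do Parcial/Ejercicio 3.py | repeticiones
-- ===== SOURCE A (Python) =====
-- def limpiarCadena(cad):
--     "Elimina de una cadena los signos (),.;:?¡¿[]{}-’!'"
--     signos = "‘(),.;:?¡¿[]{}-’!'"
--     for signo in signos:
--         cad = cad.replace(signo,"")
--     return cad
--
-- def repeticiones(cad):
--     '''Crea un diccionario donde se cuentan las repeticiones de palabras en una cadena.
--     Las claves son las palabras, los valores son la cantidad de veces que aparece esa palabra.
--     Retorna el diccionario.
--
--     '''
--     cad = cad.lower()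
--     cad = limpiarCadena(cad)
--     palabras = cad.split()
--     dic = {}
--     for palabra in palabras:
--         if palabra not in dic:
--             dic[palabra] = 1
--         else:
--             dic[palabra] += 1
--     return dic
-- ===== SOURCE B (Python) =====
-- def limpiarCadena(cad):
--     "Elimina de una cadena los signos (),.;:?¡¿[]{}-’!'"
--     signos = "‘(),.;:?¡¿[]{}-’!'"
--     for signo in signos:
--         cad = cad.replace(signo, "")
--     return cad
--
-- def repeticiones(cad):
--     palabras = limpiarCadena(cad.lower()).split()
--     return {palabra: palabras.count(palabra) for palabra in dict.fromkeys(palabras)}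
-- ===== Notes on version B (the rewrite author's own statement) =====
-- stated objective: alternative
-- what changed: Replaces the one-pass dict accumulation (insert 1 / increment per word) by an ordered dedup of the word list followed by a list.count per distinct word; lowercasing, punctuation cleaning and splitting are unchanged.
import Mathlib
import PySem

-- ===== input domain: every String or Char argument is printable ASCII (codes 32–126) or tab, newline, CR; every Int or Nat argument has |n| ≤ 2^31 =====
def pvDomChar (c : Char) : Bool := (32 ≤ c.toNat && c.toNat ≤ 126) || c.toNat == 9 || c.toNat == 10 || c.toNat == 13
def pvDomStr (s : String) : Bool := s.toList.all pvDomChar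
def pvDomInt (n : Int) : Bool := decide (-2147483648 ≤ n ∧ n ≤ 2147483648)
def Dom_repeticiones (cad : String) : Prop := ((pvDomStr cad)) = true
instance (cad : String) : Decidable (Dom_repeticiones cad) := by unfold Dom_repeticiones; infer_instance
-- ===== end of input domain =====

-- B replaces A's one-pass dict accumulation by ordered dedup + count per distinct word (alternative decomposition, same values).
-- ===== PORT A =====
def limpiarCadena (cad : String) : String :=
  "‘(),.;:?¡¿[]{}-’!'".toList.foldl (fun c signo => PySem.Str.replace c (String.ofList [signo]) "") cad

def repeticiones (cad : String) : List (String × Int) :=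
  let cad1 := PySem.Str.lower cad
  let cad2 := limpiarCadena cad1
  let palabras := PySem.Str.split₀ cad2
  let dic := palabras.foldl
    (fun d palabra =>
      if ¬ d.contains palabra then d.insert palabra 1
      else d.insert palabra (d.getD palabra 0 + 1))
    PySem.Dict.empty
  dic.items

-- ===== PORT B =====
def repeticiones_alt (cad : String) : List (String × Int) :=
  let palabras := PySem.Str.split₀ (limpiarCadena (PySem.Str.lower cad))
  (PySem.List.dedup palabras).map (fun palabra => (palabra, (palabras.count palabra : Int)))

-- ===== PRECONDITION & SPEC =====
def Spec_repeticiones (cad : String) (out : List (String × Int)) : Prop := out = repeticiones_alt cad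
instance (cad : String) (out : List (String × Int)) : Decidable (Spec_repeticiones cad out) := by unfold Spec_repeticiones; infer_instance

-- ===== CLAIM (what is proved, stated in full; the proofs are below) =====
def Claim_equal_repeticiones : Prop := ∀ (cad : String), Dom_repeticiones cad → Spec_repeticiones cad (repeticiones cad)

-- ===== LEMMAS AND PROOFS =====

theorem foldA_eq_counter (palabras : List String) :
    palabras.foldl
      (fun d palabra =>
        if ¬ d.contains palabra then d.insert palabra 1
        else d.insert palabra (d.getD palabra 0 + 1))
      PySem.Dict.empty = PySem.Dict.counter palabras := by
  rw [← PySem.Dict.foldl_insert_getD_add_one_eq_counter]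
  apply PySem.List.foldl_congr_mem
  intro d w _
  by_cases h : d.contains w
  · simp [h]
  · have h0 : d.getD w 0 = 0 := by
      have hn := (PySem.Dict.get?_eq_none_iff_contains d w).mpr (by simpa using h)
      simp [PySem.Dict.getD, hn]
    simp [h, h0]

-- ===== VERDICT (by name: the statement is the Claim_ definition above) =====
theorem repeticiones_spec : Claim_equal_repeticiones := by
  intro cad _
  unfold Spec_repeticiones repeticiones repeticiones_alt
  simp only [foldA_eq_counter, PySem.Dict.items_counter, PySem.List.dedup_eq_ofList]
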